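-- pv_equiv track=rewrite | github.com/etoiles27/gitpydata | ex0321/ex0321_09.py | para_func
-- ===== SOURCE A (Python) =====
-- def para_func(para):
--     result = 0
--     mylist = []
--     for i in para:
--         result += i
--         mylist.append(i)
--     mylist.append(result)
--     return mylist
-- ===== SOURCE B (Python) =====
-- def para_func(para):
--     xs = list(para)
--
--     def go(lo, hi):
--         # returns the answer for xs[lo:hi]: the slice followed by its sum
--         if lo == hi:
--             return [0]
--         if hi - lo == 1:
--             return [xs[lo], xs[lo]]
--         mid = (lo + hi) // 2
--         left = go(lo, mid)
--         right = go(mid, hi)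
--         return left[:-1] + right[:-1] + [left[-1] + right[-1]]
--
--     return go(0, len(xs))
-- ===== Notes on version B (the rewrite author's own statement) =====
-- stated objective: alternative
-- what changed: Replaces the single left-to-right accumulate-and-copy loop with a divide-and-conquer recursion: split the list in half, solve each half (copy plus its subtotal), and merge by dropping the two subtotals and appending their sum.
import Mathlib
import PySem

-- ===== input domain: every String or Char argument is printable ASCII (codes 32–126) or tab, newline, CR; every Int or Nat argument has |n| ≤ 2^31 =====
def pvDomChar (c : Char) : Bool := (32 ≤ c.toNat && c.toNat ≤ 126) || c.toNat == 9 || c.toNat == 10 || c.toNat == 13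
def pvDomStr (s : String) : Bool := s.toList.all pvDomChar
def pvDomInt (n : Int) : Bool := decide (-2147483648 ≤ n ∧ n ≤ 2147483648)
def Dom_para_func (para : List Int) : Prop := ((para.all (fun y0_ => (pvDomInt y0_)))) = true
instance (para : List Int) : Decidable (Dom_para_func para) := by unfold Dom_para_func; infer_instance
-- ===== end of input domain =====

-- ===== PORT A =====
-- literal port of A: single loop carrying (result, mylist)
def para_func (para : List Int) : List Int :=
  let st := para.foldl (fun (acc : Int × List Int) i => (acc.1 + i, acc.2 ++ [i])) (0, [])
  st.2 ++ [st.1]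

-- ===== PORT B =====
-- port of B's go(lo,hi): recursion over the slice xs[lo:hi]; left half is take m,
-- right half is drop m with m = (hi-lo)//2 ((lo+hi)//2 - lo = (hi-lo)//2 for 0 ≤ lo ≤ hi).
-- Python's left[:-1] is dropLast, left[-1] is getLastD 0 (go never returns [], so exact).
def pvGoB : List Int → List Int
  | [] => [0]
  | [x] => [x, x]
  | x :: y :: rest =>
    let xs := x :: y :: rest
    let m := xs.length / 2
    let left := pvGoB (xs.take m)
    let right := pvGoB (xs.drop m)
    left.dropLast ++ right.dropLast ++ [left.getLastD 0 + right.getLastD 0]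
  termination_by xs => xs.length
  decreasing_by
    · simp [List.length_take]; omega
    · simp [List.length_drop]; omega

def para_func_alt (para : List Int) : List Int := pvGoB para

-- ===== PRECONDITION & SPEC =====
def Spec_para_func (para : List Int) (out : List Int) : Prop := out = para_func_alt para
instance (para : List Int) (out : List Int) : Decidable (Spec_para_func para out) := by unfold Spec_para_func; infer_instance

-- ===== CLAIM (what is proved, stated in full; the proofs are below) =====
def Claim_equal_para_func : Prop := ∀ (para : List Int), Dom_para_func para → Spec_para_func para (para_func para)

-- ===== LEMMAS AND PROOFS =====
lemma para_fold (para : List Int) (r : Int) (acc : List Int) :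
    para.foldl (fun (acc : Int × List Int) i => (acc.1 + i, acc.2 ++ [i])) (r, acc)
      = (r + para.sum, acc ++ para) := by
  induction para generalizing r acc with
  | nil => simp
  | cons x xs ih => simp [List.foldl, ih, add_assoc]

lemma pvGoB_eq : ∀ (n : Nat) (xs : List Int), xs.length ≤ n → pvGoB xs = xs ++ [xs.sum] := by
  intro n
  induction n with
  | zero => intro xs h; simp at h; simp [h, pvGoB]
  | succ n ih =>
    intro xs h
    match xs with
    | [] => simp [pvGoB]
    | [x] => simp [pvGoB]
    | x :: y :: rest =>
      rw [pvGoB]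
      have hlen := List.length_cons (as := y :: rest) (a := x)
      set zs := x :: y :: rest with hzs
      have hm1 : 1 ≤ zs.length / 2 := by simp [hzs]; omega
      have hm2 : zs.length / 2 < zs.length := by simp [hzs]; omega
      have hL : pvGoB (zs.take (zs.length / 2)) = zs.take (zs.length / 2) ++ [(zs.take (zs.length / 2)).sum] := by
        apply ih; simp [List.length_take]; simp [hzs] at h ⊢; omega
      have hR : pvGoB (zs.drop (zs.length / 2)) = zs.drop (zs.length / 2) ++ [(zs.drop (zs.length / 2)).sum] := by
        apply ih; simp [List.length_drop]; simp [hzs] at h ⊢; omega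
      simp only [hL, hR, List.dropLast_concat, List.getLastD_concat]
      rw [List.append_assoc, ← List.sum_append, List.take_append_drop]
      rw [← List.append_assoc, List.take_append_drop]

-- ===== VERDICT (by name: the statement is the Claim_ definition above) =====
theorem para_func_spec : Claim_equal_para_func := by
  intro para _
  unfold Spec_para_func para_func para_func_alt
  simp [para_fold, pvGoB_eq para.length para le_rfl]
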